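-- pv_equiv track=rewrite | github.com/ZhenxianLi/MoSQITo_zhenxian | mosqito/sq_metrics/tonality/tonality_aures/tonality_aures.py | _find_tonal_candidates
-- ===== SOURCE A (Python) =====
-- PROMINENCE_THRESHOLD_DB = 7.0
--
-- def _find_tonal_candidates(levels_db):
--     candidates = []
--     for index in range(3, len(levels_db) - 3):
--         if levels_db[index - 1] < levels_db[index] >= levels_db[index + 1]:
--             if all(
--                 levels_db[index] - levels_db[index + offset] >= PROMINENCE_THRESHOLD_DB
--                 for offset in (-3, -2, 2, 3)
--             ):
--                 candidates.append(index)
--     return candidates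
-- ===== SOURCE B (Python) =====
-- PROMINENCE_THRESHOLD_DB = 7.0
--
-- def _find_tonal_candidates(levels_db):
--     # Staged "vectorized" style: build a peak mask and four prominence masks as
--     # whole boolean arrays first, AND them together pairwise, then read off the
--     # set indices; no per-index short-circuit test.
--     m = len(levels_db) - 6
--     peak = [
--         levels_db[k + 2] < levels_db[k + 3] and levels_db[k + 3] >= levels_db[k + 4]
--         for k in range(m)
--     ]
--     masks = [
--         [
--             levels_db[k + 3] - levels_db[k + off] >= PROMINENCE_THRESHOLD_DB
--             for k in range(m)
--         ]
--         for off in (0, 1, 5, 6)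
--     ]
--     ok = peak
--     for mask in masks:
--         ok = [x and y for x, y in zip(ok, mask)]
--     return [k + 3 for k, v in enumerate(ok) if v]
-- ===== Notes on version B (the rewrite author's own statement) =====
-- stated objective: alternative
-- what changed: Replaces A's per-index short-circuiting scan by staged whole-array passes: a peak boolean mask and four per-offset prominence masks are built as separate lists, ANDed together pairwise, and the set positions are then read off in one final pass.
import Mathlib
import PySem

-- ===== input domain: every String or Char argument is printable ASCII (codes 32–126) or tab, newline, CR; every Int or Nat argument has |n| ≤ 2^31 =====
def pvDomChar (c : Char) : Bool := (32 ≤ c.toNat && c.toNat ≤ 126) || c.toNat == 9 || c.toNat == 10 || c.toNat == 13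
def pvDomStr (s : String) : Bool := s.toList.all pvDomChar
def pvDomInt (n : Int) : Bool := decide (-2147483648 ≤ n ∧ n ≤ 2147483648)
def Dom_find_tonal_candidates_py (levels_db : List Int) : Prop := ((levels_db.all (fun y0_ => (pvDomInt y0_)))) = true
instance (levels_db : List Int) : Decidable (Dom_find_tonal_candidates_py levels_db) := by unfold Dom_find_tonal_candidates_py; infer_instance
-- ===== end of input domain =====

-- B replaces A's per-index short-circuit scan by staged whole-array boolean masks
-- (peak mask + four prominence masks) ANDed pairwise, then one read-off pass
-- (objective: alternative, same cost).

-- ===== PORT A =====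
def find_tonal_candidates_py (levels_db : List Int) : List Int :=
  (PySem.List.pyRange 3 (PySem.List.len levels_db - 3) 1).foldl
    (fun candidates index =>
      if PySem.List.pyGetD levels_db (index - 1) 0 < PySem.List.pyGetD levels_db index 0 ∧
         PySem.List.pyGetD levels_db index 0 ≥ PySem.List.pyGetD levels_db (index + 1) 0 then
        if [(-3 : Int), -2, 2, 3].all (fun offset =>
            decide (PySem.List.pyGetD levels_db index 0
              - PySem.List.pyGetD levels_db (index + offset) 0 ≥ 7)) then
          candidates ++ [index]
        else candidates
      else candidates)
    []

-- ===== PORT B =====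
def find_tonal_candidates_py_alt (levels_db : List Int) : List Int :=
  let m := (PySem.List.len levels_db - 6).toNat
  let peak := (List.range m).map (fun k =>
    decide (PySem.List.pyGetD levels_db ((k : Int) + 2) 0
        < PySem.List.pyGetD levels_db ((k : Int) + 3) 0) &&
    decide (PySem.List.pyGetD levels_db ((k : Int) + 3) 0
        ≥ PySem.List.pyGetD levels_db ((k : Int) + 4) 0))
  let masks := [(0 : Int), 1, 5, 6].map (fun off =>
    (List.range m).map (fun k =>
      decide (PySem.List.pyGetD levels_db ((k : Int) + 3) 0
        - PySem.List.pyGetD levels_db ((k : Int) + off) 0 ≥ 7)))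
  let ok := masks.foldl (fun ok mask => (ok.zip mask).map (fun p => p.1 && p.2)) peak
  (PySem.List.enumerate ok 0).filterMap (fun p => if p.2 then some (p.1 + 3) else none)

-- ===== PRECONDITION & SPEC =====
def Spec_find_tonal_candidates_py (levels_db : List Int) (out : List Int) : Prop := out = find_tonal_candidates_py_alt levels_db
instance (levels_db : List Int) (out : List Int) : Decidable (Spec_find_tonal_candidates_py levels_db out) := by unfold Spec_find_tonal_candidates_py; infer_instance

-- ===== CLAIM (what is proved, stated in full; the proofs are below) =====
def Claim_equal_find_tonal_candidates_py : Prop := ∀ (levels_db : List Int), Dom_find_tonal_candidates_py levels_db → Spec_find_tonal_candidates_py levels_db (find_tonal_candidates_py levels_db)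

-- ===== LEMMAS AND PROOFS =====

-- enumerating a mapped range is mapping the indexed tuple
theorem pvEnum_map_range {β : Type} (f : Nat → β) (w : Nat) (s : Int) :
    PySem.List.enumerate ((List.range w).map f) s
      = (List.range w).map (fun (k : Nat) => (s + (k : Int), f k)) := by
  apply List.ext_getElem
  · simp [PySem.List.length_enumerate]
  · intro k h1 h2
    have hk : k < w := by simpa [PySem.List.length_enumerate] using h1
    rw [PySem.List.getElem_enumerate]
    simp only [List.getElem_map, List.getElem_range]

-- a filtered map is a filterMap
theorem pvMapFilter {α β : Type} (q : α → Bool) (f : α → β) (l : List α) :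
    (l.filter q).map f = l.filterMap (fun x => if q x then some (f x) else none) := by
  induction l with
  | nil => rfl
  | cons x t ih => by_cases h : q x <;> simp [h, ih]

-- ===== VERDICT (by name: the statement is the Claim_ definition above) =====
theorem find_tonal_candidates_py_spec : Claim_equal_find_tonal_candidates_py := by
  intro a _
  unfold Spec_find_tonal_candidates_py
  simp only [find_tonal_candidates_py, find_tonal_candidates_py_alt]
  -- B side: collapse the mask fold into a single map over window positions
  simp only [List.map_cons, List.map_nil, List.foldl_cons, List.foldl_nil,
    List.zip_map', List.map_map]
  simp only [List.pure_def, List.bind_eq_flatMap]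
  have hcast : (List.range (PySem.List.len a - 6).toNat).flatMap (fun k : Nat => [(k : Int)])
      = (List.range (PySem.List.len a - 6).toNat).map (fun k : Nat => (k : Int)) := by
    induction (List.range (PySem.List.len a - 6).toNat) with
    | nil => rfl
    | cons x t ih => simp [ih]
  rw [hcast]
  simp only [List.map_map]
  rw [pvEnum_map_range, List.filterMap_map]
  -- A side: turn the nested if-append fold into filter, then into filterMap
  have hw : ((PySem.List.len a - 3) - 3).toNat = (PySem.List.len a - 6).toNat := by
    omega
  rw [PySem.List.pyRange_one, hw]
  have hfun :
      (fun (candidates : List Int) (index : Int) =>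
        if PySem.List.pyGetD a (index - 1) 0 < PySem.List.pyGetD a index 0 ∧
           PySem.List.pyGetD a index 0 ≥ PySem.List.pyGetD a (index + 1) 0 then
          if [(-3 : Int), -2, 2, 3].all (fun offset =>
              decide (PySem.List.pyGetD a index 0
                - PySem.List.pyGetD a (index + offset) 0 ≥ 7)) then
            candidates ++ [index]
          else candidates
        else candidates)
      = (fun (acc : List Int) (x : Int) =>
          if ((decide (PySem.List.pyGetD a (x - 1) 0 < PySem.List.pyGetD a x 0 ∧
                PySem.List.pyGetD a x 0 ≥ PySem.List.pyGetD a (x + 1) 0)) &&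
              ([(-3 : Int), -2, 2, 3].all (fun offset =>
                decide (PySem.List.pyGetD a x 0
                  - PySem.List.pyGetD a (x + offset) 0 ≥ 7)))) = true then
            acc ++ [id x] else acc) := by
    funext acc x
    by_cases h1 : PySem.List.pyGetD a (x - 1) 0 < PySem.List.pyGetD a x 0 ∧
        PySem.List.pyGetD a x 0 ≥ PySem.List.pyGetD a (x + 1) 0 <;>
      by_cases h2 : ([(-3 : Int), -2, 2, 3].all (fun offset =>
          decide (PySem.List.pyGetD a x 0
            - PySem.List.pyGetD a (x + offset) 0 ≥ 7))) = true <;>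
      simp [h1, h2]
  rw [hfun, PySem.List.foldl_append_if, List.filter_map, List.nil_append,
    pvMapFilter, List.map_id]
  apply List.filterMap_congr
  intro k hk
  have hkw : k < (PySem.List.len a - 6).toNat := List.mem_range.mp hk
  have hkl : k < a.length - 6 := by
    simp [PySem.List.len_eq] at hkw; omega
  simp only [Function.comp]
  have e1 : (3 + (k : Int)) - 1 = ((2 + k : Nat) : Int) := by omega
  have e2 : (3 + (k : Int)) + 1 = ((4 + k : Nat) : Int) := by omega
  have e3 : (3 + (k : Int)) + (-3) = ((k : Nat) : Int) := by omega
  have e4 : (3 + (k : Int)) + (-2) = ((1 + k : Nat) : Int) := by omega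
  have e5 : (3 + (k : Int)) + 2 = ((5 + k : Nat) : Int) := by omega
  have e6 : (3 + (k : Int)) + 3 = ((6 + k : Nat) : Int) := by omega
  have e0 : (3 + (k : Int)) = ((3 + k : Nat) : Int) := by omega
  have f2 : (k : Int) + 2 = ((2 + k : Nat) : Int) := by omega
  have f3 : (k : Int) + 3 = ((3 + k : Nat) : Int) := by omega
  have f4 : (k : Int) + 4 = ((4 + k : Nat) : Int) := by omega
  have f0 : (k : Int) + 0 = ((k : Nat) : Int) := by omega
  have f1 : (k : Int) + 1 = ((1 + k : Nat) : Int) := by omega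
  have f5 : (k : Int) + 5 = ((5 + k : Nat) : Int) := by omega
  have f6 : (k : Int) + 6 = ((6 + k : Nat) : Int) := by omega
  simp only [List.all_cons, List.all_nil, e1, e2, e3, e4, e5, e6, f0, f1, f2, f4, f5, f6]
  rw [e0, f3]
  simp only [PySem.List.pyGetD_natCast, Bool.and_true]
  have hz : (3 : Int) + (k : Int) = (k : Int) + 3 := by omega
  by_cases h1 : (a[2+k]?).getD 0 < (a[3+k]?).getD 0 <;>
    by_cases h2 : (a[4+k]?).getD 0 ≤ (a[3+k]?).getD 0 <;>
    by_cases h3 : (7:Int) ≤ (a[3+k]?).getD 0 - (a[k]?).getD 0 <;>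
    by_cases h4 : (7:Int) ≤ (a[3+k]?).getD 0 - (a[1+k]?).getD 0 <;>
    by_cases h5 : (7:Int) ≤ (a[3+k]?).getD 0 - (a[5+k]?).getD 0 <;>
    by_cases h6 : (7:Int) ≤ (a[3+k]?).getD 0 - (a[6+k]?).getD 0 <;>
    simp [h1, h2, h3, h4, h5, h6, hz]
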